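-- pv_equiv track=rewrite | github.com/SAMI-CODEAI/PYTHON | TCS-CODEVITA/ArrangeMap.py | makeGr
-- ===== SOURCE A (Python) =====
-- def makeGr(arrangement, sheets, N, M):
--     grid = [["" for _ in range(N)] for _ in range(N)]
--     num_sheets = N // M
--
--     for idx, sidx in enumerate(arrangement):
--         sheet = sheets[sidx]
--         bi = (idx // num_sheets) * M
--         bj = (idx % num_sheets) * M
--
--         for i in range(M):
--             for j in range(M):
--                 grid[bi + i][bj + j] = sheet[i][j]
--
--     return grid
-- ===== SOURCE B (Python) =====
-- def makeGr(arrangement, sheets, N, M):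
--     num_sheets = N // M
--     placed = [sheets[s] for s in arrangement]
--     grid = []
--     for r in range(N):
--         row = []
--         if r // M < num_sheets:
--             br, i = divmod(r, M)
--             for bc in range(num_sheets):
--                 idx = br * num_sheets + bc
--                 if idx < len(placed):
--                     row += placed[idx][i][:M]
--         row += [""] * (N - len(row))
--         grid.append(row)
--     return grid
-- ===== Notes on version B (the rewrite author's own statement) =====
-- stated objective: alternative
-- what changed: B assembles each output row directly by concatenating whole M-wide segments of the placed sheets (block-row by block-row) and padding with empty strings, instead of A's per-cell scatter writes into a pre-built N x N grid indexed through div/mod of the arrangement position.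
import Mathlib
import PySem

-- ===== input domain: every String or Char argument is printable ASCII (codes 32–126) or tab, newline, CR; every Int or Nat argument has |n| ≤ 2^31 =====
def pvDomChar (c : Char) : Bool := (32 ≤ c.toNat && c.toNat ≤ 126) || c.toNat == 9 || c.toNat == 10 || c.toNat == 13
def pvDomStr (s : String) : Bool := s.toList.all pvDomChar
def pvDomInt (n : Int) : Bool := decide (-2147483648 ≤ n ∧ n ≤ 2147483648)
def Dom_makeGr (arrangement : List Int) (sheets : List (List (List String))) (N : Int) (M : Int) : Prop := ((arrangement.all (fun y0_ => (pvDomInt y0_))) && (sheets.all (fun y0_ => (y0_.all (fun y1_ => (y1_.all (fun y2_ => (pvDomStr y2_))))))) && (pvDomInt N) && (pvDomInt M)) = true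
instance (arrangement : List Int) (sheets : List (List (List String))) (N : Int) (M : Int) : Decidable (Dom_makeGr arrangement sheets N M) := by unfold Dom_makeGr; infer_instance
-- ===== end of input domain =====

-- B assembles the output row by row (concatenating whole M-wide sheet segments, then padding),
-- instead of A's per-cell scatter writes into a pre-built grid; objective: alternative decomposition.


-- ===== PORT A =====
-- Python's in-place 'grid[bi+i][bj+j] = v' is ported as pySetD/pyGetD, which are exact for the
-- indices reachable under Pre_ (an out-of-range write would be an IndexError, excluded by Pre_).
def makeGr (arrangement : List Int) (sheets : List (List (List String))) (N : Int) (M : Int) : List (List String) :=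
  let grid := (PySem.List.pyRange 0 N 1).map (fun _ => (PySem.List.pyRange 0 N 1).map (fun _ => ""))
  let numSheets := PySem.Int.floordiv N M
  (PySem.List.enumerate arrangement 0).foldl (fun grid p =>
    let sheet := PySem.List.pyGetD sheets p.2 []
    let bi := (PySem.Int.floordiv p.1 numSheets) * M
    let bj := (PySem.Int.mod p.1 numSheets) * M
    (PySem.List.pyRange 0 M 1).foldl (fun grid i =>
      (PySem.List.pyRange 0 M 1).foldl (fun grid j =>
        PySem.List.pySetD grid (bi + i)
          (PySem.List.pySetD (PySem.List.pyGetD grid (bi + i) [])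
            (bj + j)
            (PySem.List.pyGetD (PySem.List.pyGetD sheet i []) j ""))) grid) grid) grid

-- ===== PORT B =====
def makeGr_alt (arrangement : List Int) (sheets : List (List (List String))) (N : Int) (M : Int) : List (List String) :=
  let numSheets := PySem.Int.floordiv N M
  let placed := arrangement.map (fun s => PySem.List.pyGetD sheets s [])
  (PySem.List.pyRange 0 N 1).foldl (fun grid r =>
    let row :=
      if PySem.Int.floordiv r M < numSheets then
        let br := PySem.Int.floordiv r M
        let i := PySem.Int.mod r M
        (PySem.List.pyRange 0 numSheets 1).foldl (fun row bc =>
          let idx := br * numSheets + bc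
          if idx < (placed.length : Int) then
            row ++ PySem.List.slice (PySem.List.pyGetD (PySem.List.pyGetD placed idx []) i []) none (some M)
          else row) []
      else []
    grid ++ [row ++ PySem.List.pyRepeat [""] (N - (row.length : Int))]) []

-- ===== PRECONDITION & SPEC =====
-- Pre_ is exactly the inputs where the Python A returns normally: for 0 < M the grid must fit
-- (N//M ≥ 1, at most (N//M)² sheets), every sheet index must be in range and every used sheet at
-- least M×M (otherwise IndexError); for M < 0 the inner loops are empty and A returns whenever
-- N//M ≠ 0 (else ZeroDivisionError) and every sheet index is in range; M = 0 always raises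
-- ZeroDivisionError and is excluded.
def Pre_makeGr (arrangement : List Int) (sheets : List (List (List String))) (N : Int) (M : Int) : Prop :=
  (0 < M ∧ (arrangement = [] ∨
    (1 ≤ PySem.Int.floordiv N M ∧
     (arrangement.length : Int) ≤ PySem.Int.floordiv N M * PySem.Int.floordiv N M ∧
     ∀ s ∈ arrangement, PySem.Raise.InRange sheets.length s ∧
       M ≤ ((PySem.List.pyGetD sheets s []).length : Int) ∧
       ∀ row ∈ (PySem.List.pyGetD sheets s []).take M.toNat, M ≤ (row.length : Int)))) ∨
  (M < 0 ∧ (arrangement = [] ∨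
    (PySem.Int.floordiv N M ≠ 0 ∧ ∀ s ∈ arrangement, PySem.Raise.InRange sheets.length s)))
instance (arrangement : List Int) (sheets : List (List (List String))) (N : Int) (M : Int) : Decidable (Pre_makeGr arrangement sheets N M) := by unfold Pre_makeGr; infer_instance

def pvWitness_makeGr : List Int × List (List (List String)) × Int × Int :=
  ([0, 1, 2, 3],
   [[["a", "b"], ["c", "d"]], [["e", "f"], ["g", "h"]],
    [["i", "j"], ["k", "l"]], [["m", "n"], ["o", "p"]]], 5, 2)

def Spec_makeGr (arrangement : List Int) (sheets : List (List (List String))) (N : Int) (M : Int) (out : List (List String)) : Prop := out = makeGr_alt arrangement sheets N M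
instance (arrangement : List Int) (sheets : List (List (List String))) (N : Int) (M : Int) (out : List (List String)) : Decidable (Spec_makeGr arrangement sheets N M out) := by unfold Spec_makeGr; infer_instance

-- ===== CLAIM (what is proved, stated in full; the proofs are below) =====
def Claim_equal_makeGr : Prop := ∀ (arrangement : List Int) (sheets : List (List (List String))) (N : Int) (M : Int), Dom_makeGr arrangement sheets N M → Pre_makeGr arrangement sheets N M → Spec_makeGr arrangement sheets N M (makeGr arrangement sheets N M)

-- ===== LEMMAS AND PROOFS =====

-- the value of the (r, c) cell of the finished grid, in ℕ form
def pvCell (arrangement : List Int) (sheets : List (List (List String))) (m nsn L : Nat) (r c : Nat) : String :=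
  if r / m < nsn ∧ c / m < nsn ∧ (r / m) * nsn + c / m < L then
    ((PySem.List.pyGetD sheets (arrangement.getD ((r / m) * nsn + c / m) 0) []).getD (r % m) []).getD (c % m) ""
  else ""

-- a grid given by a cell function
def pvGrid (n : Nat) (f : Nat → Nat → String) : List (List String) :=
  (List.range n).map (fun r => (List.range n).map (f r))

theorem pvGrid_congr (n : Nat) (f g : Nat → Nat → String)
    (h : ∀ r < n, ∀ c < n, f r c = g r c) : pvGrid n f = pvGrid n g := by
  unfold pvGrid
  refine List.map_congr_left (fun r hr => ?_)
  exact List.map_congr_left (fun c hc => h r (List.mem_range.mp hr) c (List.mem_range.mp hc))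

theorem pv_set_map_range {α : Type} (n k : Nat) (g : Nat → α) (v : α) (_hk : k < n) :
    ((List.range n).map g).set k v = (List.range n).map (fun c => if c = k then v else g c) := by
  apply List.ext_getElem
  · simp
  · intro i h1 h2
    simp only [List.getElem_set, List.getElem_map, List.getElem_range]
    by_cases h : k = i
    · subst h; simp
    · rw [if_neg h, if_neg (Ne.symm h)]

theorem pv_rowWrite (n bj : Nat) (w : Nat → String) (g : Nat → String) : ∀ (t : Nat), bj + t ≤ n →
    (List.range t).foldl (fun row j => row.set (bj + j) (w j)) ((List.range n).map g)
    = (List.range n).map (fun c => if bj ≤ c ∧ c < bj + t then w (c - bj) else g c) := by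
  intro t
  induction t with
  | zero =>
    intro hbt
    simp only [List.range_zero, List.foldl_nil]
    refine (List.map_congr_left (fun c hc => ?_)).symm
    rw [if_neg (by omega)]
  | succ t ih =>
    intro hbt
    rw [List.range_succ, List.foldl_append]
    simp only [List.foldl_cons, List.foldl_nil]
    rw [ih (by omega), pv_set_map_range n (bj + t) _ _ (by omega)]
    refine List.map_congr_left (fun c hc => ?_)
    have hc' := List.mem_range.mp hc
    by_cases h1 : c = bj + t
    · rw [if_pos h1, if_pos (by omega)]
      subst h1; congr 1; omega
    · rw [if_neg h1]
      by_cases h2 : bj ≤ c ∧ c < bj + t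
      · rw [if_pos h2, if_pos (by omega)]
      · rw [if_neg h2, if_neg (by omega)]

theorem pv_innerGrid (bj : Nat) (w : Nat → String) (m : Nat) :
    ∀ (g0 : List (List String)) (r0 : Nat), r0 < g0.length →
    (List.range m).foldl (fun g j => g.set r0 ((g.getD r0 []).set (bj + j) (w j))) g0
    = g0.set r0 ((List.range m).foldl (fun row j => row.set (bj + j) (w j)) (g0.getD r0 [])) := by
  induction m with
  | zero =>
    intro g0 r0 h
    simp only [List.range_zero, List.foldl_nil]
    have hget : g0.getD r0 [] = g0[r0] := by simp [List.getD, List.getElem?_eq_getElem h]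
    rw [hget, List.set_getElem_self]
  | succ m ih =>
    intro g0 r0 h
    rw [List.range_succ, List.foldl_append, List.foldl_append]
    simp only [List.foldl_cons, List.foldl_nil]
    rw [ih g0 r0 h]
    generalize (List.range m).foldl (fun row j => row.set (bj + j) (w j)) (g0.getD r0 []) = R
    have hlen : r0 < (g0.set r0 R).length := by simpa using h
    have hget : (g0.set r0 R).getD r0 [] = R := by simp [List.getD, h]
    rw [hget, List.set_set]

theorem pv_blockWrite (n bi bj m : Nat) (hbj : bj + m ≤ n)
    (v : Nat → Nat → String) (f : Nat → Nat → String) : ∀ (t : Nat), bi + t ≤ n →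
    (List.range t).foldl (fun g i =>
      (List.range m).foldl (fun g j =>
        g.set (bi + i) ((g.getD (bi + i) []).set (bj + j) (v i j))) g) (pvGrid n f)
    = pvGrid n (fun r c => if bi ≤ r ∧ r < bi + t ∧ bj ≤ c ∧ c < bj + m then v (r - bi) (c - bj) else f r c) := by
  intro t
  induction t with
  | zero =>
    intro hbi
    simp only [List.range_zero, List.foldl_nil]
    refine pvGrid_congr n _ _ (fun r hr c hc => ?_)
    rw [if_neg (by omega)]
  | succ t ih =>
    intro hbi
    rw [List.range_succ, List.foldl_append]
    simp only [List.foldl_cons, List.foldl_nil]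
    rw [ih (by omega)]
    have hlen : bi + t < (pvGrid n (fun r c => if bi ≤ r ∧ r < bi + t ∧ bj ≤ c ∧ c < bj + m then v (r - bi) (c - bj) else f r c)).length := by
      simp [pvGrid]; omega
    rw [pv_innerGrid bj (v t) m _ (bi + t) hlen]
    have hget : (pvGrid n (fun r c => if bi ≤ r ∧ r < bi + t ∧ bj ≤ c ∧ c < bj + m then v (r - bi) (c - bj) else f r c)).getD (bi + t) []
        = (List.range n).map (fun c => if bi ≤ bi + t ∧ bi + t < bi + t ∧ bj ≤ c ∧ c < bj + m then v (bi + t - bi) (c - bj) else f (bi + t) c) := by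
      simp only [pvGrid]
      rw [PySem.List.getD_map_range]
      omega
    rw [hget, pv_rowWrite n bj (v t) _ m hbj]
    unfold pvGrid
    rw [pv_set_map_range n (bi + t) _ _ (by omega)]
    refine List.map_congr_left (fun r hr => ?_)
    have hr' := List.mem_range.mp hr
    by_cases h1 : r = bi + t
    · rw [if_pos h1]
      refine List.map_congr_left (fun c hc => ?_)
      dsimp only
      by_cases h2 : bj ≤ c ∧ c < bj + m
      · rw [if_pos h2, if_pos (by omega), h1]
        congr 1; omega
      · rw [if_neg (by omega), if_neg (by omega), if_neg (by omega), h1]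
    · rw [if_neg h1]
      refine List.map_congr_left (fun c hc => ?_)
      dsimp only
      by_cases h2 : bi ≤ r ∧ r < bi + t ∧ bj ≤ c ∧ c < bj + m
      · rw [if_pos h2, if_pos (by omega)]
      · rw [if_neg h2, if_neg (by omega)]


theorem pv_cell_step (sheets : List (List (List String))) (m nsn : Nat) (hm : 0 < m) (hns : 0 < nsn)
    (xs : List Int) (x : Int) (hlen : xs.length + 1 ≤ nsn * nsn) (r c : Nat) :
    (if xs.length / nsn * m ≤ r ∧ r < xs.length / nsn * m + m ∧ xs.length % nsn * m ≤ c ∧ c < xs.length % nsn * m + m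
      then ((PySem.List.pyGetD sheets x []).getD (r - xs.length / nsn * m) []).getD (c - xs.length % nsn * m) ""
      else pvCell xs sheets m nsn xs.length r c)
    = pvCell (xs ++ [x]) sheets m nsn (xs.length + 1) r c := by
  set k := xs.length with hkdef
  set kd := k / nsn with hkddef
  set km := k % nsn with hkmdef
  have hkk : nsn * kd + km = k := Nat.div_add_mod k nsn
  have hkdlt : kd < nsn := (Nat.div_lt_iff_lt_mul hns).mpr (by omega)
  have hkmlt : km < nsn := Nat.mod_lt k hns
  have hidx : kd * nsn + km = k := by rw [Nat.mul_comm]; exact hkk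
  have hgetx : (xs ++ [x]).getD k 0 = x := by simp [List.getD, hkdef]
  by_cases hblk : kd * m ≤ r ∧ r < kd * m + m ∧ km * m ≤ c ∧ c < km * m + m
  · rw [if_pos hblk]
    have hrd : r / m = kd := Nat.div_eq_of_lt_le hblk.1 (by rw [Nat.succ_mul]; exact hblk.2.1)
    have hcd : c / m = km := Nat.div_eq_of_lt_le hblk.2.2.1 (by rw [Nat.succ_mul]; exact hblk.2.2.2)
    have hrm : r % m = r - kd * m := by
      have h1 := Nat.div_add_mod r m
      rw [hrd, Nat.mul_comm] at h1
      omega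
    have hcm : c % m = c - km * m := by
      have h1 := Nat.div_add_mod c m
      rw [hcd, Nat.mul_comm] at h1
      omega
    unfold pvCell
    rw [hrd, hcd, if_pos ⟨hkdlt, hkmlt, by rw [hidx]; omega⟩, hidx, hgetx, hrm, hcm]
  · rw [if_neg hblk]
    unfold pvCell
    by_cases hq : r / m < nsn ∧ c / m < nsn
    · have hne : r / m * nsn + c / m ≠ k := by
        intro he
        have hdiv : (r / m * nsn + c / m) / nsn = r / m := by
          rw [Nat.mul_comm, Nat.mul_add_div hns, Nat.div_eq_of_lt hq.2, Nat.add_zero]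
        have hra : r / m = kd := by rw [← hdiv, he]
        have hca : c / m = km := by
          have h3 : nsn * kd + c / m = k := by rw [← he, hra, Nat.mul_comm]
          exact Nat.add_left_cancel (h3.trans hkk.symm)
        have h1 := Nat.div_add_mod r m
        rw [hra, Nat.mul_comm] at h1
        have h2 := Nat.mod_lt r hm
        have h3 := Nat.div_add_mod c m
        rw [hca, Nat.mul_comm] at h3
        have h4 := Nat.mod_lt c hm
        exact hblk ⟨by omega, by omega, by omega, by omega⟩
      by_cases hlt : r / m * nsn + c / m < k
      · rw [if_pos ⟨hq.1, hq.2, hlt⟩, if_pos ⟨hq.1, hq.2, by omega⟩]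
        have hpre : (xs ++ [x]).getD (r / m * nsn + c / m) 0 = xs.getD (r / m * nsn + c / m) 0 := by
          simp [List.getD, List.getElem?_append_left (show r / m * nsn + c / m < xs.length by omega)]
        rw [hpre]
      · rw [if_neg (fun h => hlt h.2.2), if_neg (fun h => hlt (by omega))]
    · rw [if_neg (fun h => hq ⟨h.1, h.2.1⟩), if_neg (fun h => hq ⟨h.1, h.2.1⟩)]

theorem pv_A_fold (sheets : List (List (List String))) (n m nsn : Nat)
    (hm : 0 < m) (hns : 0 < nsn) (hnm : nsn * m ≤ n) :
    ∀ (ar : List Int), ar.length ≤ nsn * nsn →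
    (PySem.List.enumerate ar 0).foldl (fun grid p =>
      (PySem.List.pyRange 0 (m : Int) 1).foldl (fun grid i =>
        (PySem.List.pyRange 0 (m : Int) 1).foldl (fun grid j =>
          PySem.List.pySetD grid ((PySem.Int.floordiv p.1 (nsn : Int)) * (m : Int) + i)
            (PySem.List.pySetD (PySem.List.pyGetD grid ((PySem.Int.floordiv p.1 (nsn : Int)) * (m : Int) + i) [])
              ((PySem.Int.mod p.1 (nsn : Int)) * (m : Int) + j)
              (PySem.List.pyGetD (PySem.List.pyGetD (PySem.List.pyGetD sheets p.2 []) i []) j ""))) grid) grid)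
      (pvGrid n (fun _ _ => ""))
    = pvGrid n (pvCell ar sheets m nsn ar.length) := by
  intro ar
  induction ar using List.reverseRecOn with
  | nil =>
    intro _
    rw [PySem.List.enumerate_nil]
    simp only [List.foldl_nil, List.length_nil]
    refine pvGrid_congr n _ _ (fun r hr c hc => ?_)
    unfold pvCell
    rw [if_neg (fun h => Nat.not_lt_zero _ h.2.2)]
  | append_singleton xs x ih =>
    intro hlen
    have hlen' : xs.length + 1 ≤ nsn * nsn := by simpa using hlen
    rw [PySem.List.enumerate_append, PySem.List.enumerate_cons, PySem.List.enumerate_nil, List.foldl_append]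
    simp only [List.foldl_cons, List.foldl_nil, zero_add]
    rw [ih (by omega)]
    have hkdlt : xs.length / nsn < nsn := (Nat.div_lt_iff_lt_mul hns).mpr (by omega)
    have hkmlt : xs.length % nsn < nsn := Nat.mod_lt xs.length hns
    have hbi : xs.length / nsn * m + m ≤ n := by
      have h1 : (xs.length / nsn + 1) * m ≤ nsn * m := Nat.mul_le_mul_right m hkdlt
      rw [Nat.succ_mul] at h1
      omega
    have hbj : xs.length % nsn * m + m ≤ n := by
      have h1 : (xs.length % nsn + 1) * m ≤ nsn * m := Nat.mul_le_mul_right m hkmlt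
      rw [Nat.succ_mul] at h1
      omega
    simp only [PySem.Int.floordiv_natCast, PySem.Int.mod_natCast, PySem.List.pyRange_one,
      sub_zero, Int.toNat_natCast, List.foldl_map, zero_add, ← Nat.cast_mul, ← Nat.cast_add,
      PySem.List.pySetD_natCast, PySem.List.pyGetD_natCast]
    rw [pv_blockWrite n (xs.length / nsn * m) (xs.length % nsn * m) m hbj
      (fun i j => ((PySem.List.pyGetD sheets x []).getD i []).getD j "")
      (pvCell xs sheets m nsn xs.length) m hbi]
    simp only [List.length_append, List.length_cons, List.length_nil]
    refine pvGrid_congr n _ _ (fun r hr c hc => ?_)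
    exact pv_cell_step sheets m nsn hm hns xs x hlen' r c


theorem pv_pyRange_foldl {α : Type} (n : Nat) (F : α → Int → α) (init : α) :
    (PySem.List.pyRange 0 (n : Int) 1).foldl F init = (List.range n).foldl (fun acc (k : Nat) => F acc (k : Int)) init := by
  rw [PySem.List.pyRange_one, List.foldl_map]
  simp only [sub_zero, Int.toNat_natCast, zero_add]

theorem pv_pyRange_map {α : Type} (n : Nat) (f : Int → α) :
    (PySem.List.pyRange 0 (n : Int) 1).map f = (List.range n).map (fun (k : Nat) => f (k : Int)) := by
  rw [PySem.List.pyRange_one]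
  simp only [sub_zero, Int.toNat_natCast, List.map_map, Function.comp_def, zero_add]

theorem pv_filter_range (t : Nat) : ∀ (a : Nat),
    (List.range a).filter (fun x => decide (x < t)) = List.range (min a t) := by
  intro a
  induction a with
  | zero => simp
  | succ a ih =>
    rw [List.range_succ, List.filter_append, ih]
    by_cases h : a < t
    · rw [show min (a + 1) t = min a t + 1 by omega, show min a t = a by omega, List.range_succ]
      simp [h]
    · rw [show min (a + 1) t = min a t by omega]
      simp [h]

theorem pv_flat_len (m : Nat) (seg : Nat → List String) : ∀ (t : Nat),
    (∀ b, b < t → (seg b).length = m) → ((List.range t).flatMap seg).length = t * m := by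
  intro t
  induction t with
  | zero => intro _; simp
  | succ t ih =>
    intro h
    rw [List.range_succ, List.flatMap_append, List.length_append, ih (fun b hb => h b (by omega)),
      List.flatMap_singleton, h t (by omega), Nat.succ_mul]

theorem pv_flat_getD (m : Nat) (seg : Nat → List String) : ∀ (t : Nat),
    (∀ b, b < t → (seg b).length = m) → ∀ c, c < t * m →
    ((List.range t).flatMap seg).getD c "" = (seg (c / m)).getD (c % m) "" := by
  intro t
  induction t with
  | zero => intro _ c hc; exact absurd hc (by omega)
  | succ t ih =>
    intro h c hc
    have hlen := pv_flat_len m seg t (fun b hb => h b (by omega))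
    rw [List.range_succ, List.flatMap_append, List.flatMap_singleton]
    by_cases hcl : c < t * m
    · rw [show ((List.range t).flatMap seg ++ seg t).getD c "" = ((List.range t).flatMap seg).getD c "" from by
        simp [List.getD, List.getElem?_append_left (show c < ((List.range t).flatMap seg).length by omega)]]
      exact ih (fun b hb => h b (by omega)) c hcl
    · have hcu : c < t * m + m := by rw [Nat.succ_mul] at hc; omega
      have hdc : c / m = t := Nat.div_eq_of_lt_le (by omega) (by rw [Nat.succ_mul]; omega)
      have hmc : c % m = c - t * m := by
        have h1 := Nat.div_add_mod c m
        rw [hdc, Nat.mul_comm] at h1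
        omega
      rw [hdc, hmc]
      simp [List.getD, List.getElem?_append_right (show ((List.range t).flatMap seg).length ≤ c by omega), hlen]

theorem pv_rowAssemble (n m tk : Nat) (_hm : 0 < m) (seg : Nat → List String)
    (hseg : ∀ b, b < tk → (seg b).length = m) (h : tk * m ≤ n) (g : Nat → String)
    (h1 : ∀ c, c < tk * m → (seg (c / m)).getD (c % m) "" = g c)
    (h2 : ∀ c, tk * m ≤ c → c < n → g c = "") :
    (List.range tk).flatMap seg ++ List.replicate (n - tk * m) "" = (List.range n).map g := by
  have hlen := pv_flat_len m seg tk hseg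
  apply List.ext_getElem
  · simp [hlen]; omega
  · intro i hi1 hi2
    have hin : i < n := by simpa using hi2
    rw [← List.getD_eq_getElem _ "" hi1, ← List.getD_eq_getElem _ "" hi2,
      show ((List.range n).map g).getD i "" = g i from by simp [List.getD, hin]]
    by_cases hc : i < tk * m
    · rw [show ((List.range tk).flatMap seg ++ List.replicate (n - tk * m) "").getD i ""
          = ((List.range tk).flatMap seg).getD i "" from by
        simp [List.getD, List.getElem?_append_left (show i < ((List.range tk).flatMap seg).length by omega)]]
      rw [pv_flat_getD m seg tk hseg i hc]
      exact h1 i hc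
    · rw [show ((List.range tk).flatMap seg ++ List.replicate (n - tk * m) "").getD i ""
          = ("" : String) from by
        simp [List.getD, List.getElem?_append_right (show ((List.range tk).flatMap seg).length ≤ i by omega), hlen,
          show i - tk * m < n - tk * m by omega]]
      exact (h2 i (by omega) hin).symm


theorem pv_B_fold (arrangement : List Int) (sheets : List (List (List String))) (n m nsn : Nat)
    (hm : 0 < m) (hns : 0 < nsn) (hnm : nsn * m ≤ n) (_hL : arrangement.length ≤ nsn * nsn)
    (hsheet : ∀ s ∈ arrangement, (m : Int) ≤ ((PySem.List.pyGetD sheets s []).length : Int) ∧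
       ∀ row ∈ (PySem.List.pyGetD sheets s []).take m, (m : Int) ≤ ((row.length : Nat) : Int)) :
    (let placed := arrangement.map (fun s => PySem.List.pyGetD sheets s []);
     (PySem.List.pyRange 0 (n : Int) 1).foldl (fun grid r =>
      let row :=
        if PySem.Int.floordiv r (m : Int) < (nsn : Int) then
          let br := PySem.Int.floordiv r (m : Int)
          let i := PySem.Int.mod r (m : Int)
          (PySem.List.pyRange 0 (nsn : Int) 1).foldl (fun row bc =>
            let idx := br * (nsn : Int) + bc
            if idx < (placed.length : Int) then
              row ++ PySem.List.slice (PySem.List.pyGetD (PySem.List.pyGetD placed idx []) i []) none (some (m : Int))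
            else row) []
        else []
      grid ++ [row ++ PySem.List.pyRepeat [""] ((n : Int) - (row.length : Int))]) [])
    = pvGrid n (pvCell arrangement sheets m nsn arrangement.length) := by
  dsimp only
  have hplaced : ∀ idx, idx < arrangement.length →
      (arrangement.map (fun s => PySem.List.pyGetD sheets s [])).getD idx []
      = PySem.List.pyGetD sheets (arrangement.getD idx 0) [] := by
    intro idx hidx
    simp [List.getD, List.getElem?_eq_getElem hidx, List.getElem?_map]
  simp only [List.length_map]
  rw [PySem.List.foldl_append_singleton_eq_map, List.nil_append, pv_pyRange_map]
  unfold pvGrid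
  refine List.map_congr_left (fun rn hrn => ?_)
  have hrn' : rn < n := List.mem_range.mp hrn
  have hslice : ∀ xs : List String, PySem.List.slice xs none (some (m : Int)) = xs.take m := by
    intro xs
    rw [PySem.List.slice_to xs (by exact_mod_cast Nat.zero_le m)]
    simp
  simp only [PySem.Int.floordiv_natCast, PySem.Int.mod_natCast, Nat.cast_lt, hslice,
    PySem.List.pyGetD_natCast]
  by_cases hcond : rn / m < nsn
  · rw [if_pos hcond]
    rw [pv_pyRange_foldl]
    simp only [← Nat.cast_mul, ← Nat.cast_add, Nat.cast_lt, PySem.List.pyGetD_natCast]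
    rw [PySem.List.foldl_ite_eq_foldl_filter
      (p := fun bc : Nat => rn / m * nsn + bc < arrangement.length)]
    have hdec : ∀ bc : Nat, (decide (rn / m * nsn + bc < arrangement.length))
        = decide (bc < arrangement.length - rn / m * nsn) := fun bc => by
      rw [decide_eq_decide, Nat.lt_sub_iff_add_lt, Nat.add_comm]
    simp only [hdec, pv_filter_range]
    rw [PySem.List.foldl_append_eq_flatMap, List.nil_append]
    set tk := min nsn (arrangement.length - rn / m * nsn) with htk
    set seg := fun bc : Nat =>
      (((arrangement.map (fun s => PySem.List.pyGetD sheets s [])).getD (rn / m * nsn + bc) []).getD (rn % m) []).take m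
      with hseg
    have hrm : rn % m < m := Nat.mod_lt rn hm
    have hseglen : ∀ b, b < tk → (seg b).length = m := by
      intro b hb
      have hidx' : rn / m * nsn + b < arrangement.length := by
        have h1 : b < arrangement.length - rn / m * nsn := lt_of_lt_of_le hb (Nat.min_le_right _ _)
        have h2 := Nat.lt_sub_iff_add_lt.mp h1
        rwa [Nat.add_comm] at h2
      have hmem : arrangement.getD (rn / m * nsn + b) 0 ∈ arrangement := by
        have h8 := List.getElem_mem hidx'
        rwa [show arrangement[rn / m * nsn + b]'hidx' = arrangement.getD (rn / m * nsn + b) 0 from by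
          simp [List.getD, List.getElem?_eq_getElem hidx']] at h8
      obtain ⟨hslen, hrows⟩ := hsheet _ hmem
      have hms : m ≤ (PySem.List.pyGetD sheets (arrangement.getD (rn / m * nsn + b) 0) []).length := by
        exact_mod_cast hslen
      have hrmem : (PySem.List.pyGetD sheets (arrangement.getD (rn / m * nsn + b) 0) []).getD (rn % m) []
          ∈ (PySem.List.pyGetD sheets (arrangement.getD (rn / m * nsn + b) 0) []).take m := by
        have hlt1 : rn % m < (PySem.List.pyGetD sheets (arrangement.getD (rn / m * nsn + b) 0) []).length := by
          omega
        have hlt2 : rn % m < ((PySem.List.pyGetD sheets (arrangement.getD (rn / m * nsn + b) 0) []).take m).length := by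
          simp only [List.length_take]
          omega
        rw [show (PySem.List.pyGetD sheets (arrangement.getD (rn / m * nsn + b) 0) []).getD (rn % m) []
            = ((PySem.List.pyGetD sheets (arrangement.getD (rn / m * nsn + b) 0) []).take m)[rn % m]'hlt2 from by
          rw [List.getD_eq_getElem _ _ hlt1, List.getElem_take]]
        exact List.getElem_mem _
      have h7 : m ≤ ((PySem.List.pyGetD sheets (arrangement.getD (rn / m * nsn + b) 0) []).getD (rn % m) []).length := by
        exact_mod_cast hrows _ hrmem
      simp only [hseg]
      rw [hplaced _ hidx']
      simp only [List.length_take]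
      omega
    have htkm : tk * m ≤ n := by
      have : tk ≤ nsn := by omega
      calc tk * m ≤ nsn * m := Nat.mul_le_mul_right m this
        _ ≤ n := hnm
    have hflen : ((List.range tk).flatMap seg).length = tk * m := pv_flat_len m seg tk hseglen
    rw [hflen, PySem.List.pyRepeat_singleton,
      show (((n : Nat) : Int) - ((tk * m : Nat) : Int)).toNat = n - tk * m by omega]
    refine pv_rowAssemble n m tk hm seg hseglen htkm _ ?_ ?_
    · intro c hc
      have hcd : c / m < tk := (Nat.div_lt_iff_lt_mul hm).mpr hc
      have hcm : c % m < m := Nat.mod_lt c hm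
      have hcd2 : c / m < arrangement.length - rn / m * nsn := lt_of_lt_of_le hcd (Nat.min_le_right _ _)
      have hcd3 : rn / m * nsn + c / m < arrangement.length := by
        have h2 := Nat.lt_sub_iff_add_lt.mp hcd2
        rwa [Nat.add_comm] at h2
      unfold pvCell
      rw [if_pos ⟨hcond, by omega, hcd3⟩]
      simp only [hseg]
      rw [hplaced _ hcd3]
      simp [List.getD, hcm]
    · intro c hc1 hc2
      have hcd : tk ≤ c / m := (Nat.le_div_iff_mul_le hm).mpr hc1
      unfold pvCell
      refine if_neg (fun hp => ?_)
      rcases Nat.le_total nsn (arrangement.length - rn / m * nsn) with hmn | hmn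
      · rw [htk, Nat.min_eq_left hmn] at hcd
        omega
      · rw [htk, Nat.min_eq_right hmn] at hcd
        have h2 : c / m < arrangement.length - rn / m * nsn := by
          rw [Nat.lt_sub_iff_add_lt, Nat.add_comm]
          exact hp.2.2
        omega
  · rw [if_neg hcond]
    simp only [List.nil_append, List.length_nil, Nat.cast_zero, sub_zero,
      PySem.List.pyRepeat_singleton, Int.toNat_natCast]
    rw [show (List.range n).map (fun c => pvCell arrangement sheets m nsn arrangement.length rn c)
        = (List.range n).map (fun _ => ("" : String)) from
      List.map_congr_left (fun c _ => by unfold pvCell; rw [if_neg (fun hp => hcond hp.1)])]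
    apply List.ext_getElem <;> simp

-- for M < 0 both ports return the untouched all-"" grid: A's inner loops are over the empty
-- range(M), and B's block-row test r//M < N//M never holds for 0 ≤ r < N when M < 0
theorem pv_M_neg (arrangement : List Int) (sheets : List (List (List String))) (N M : Int)
    (hMneg : M < 0) : makeGr arrangement sheets N M = makeGr_alt arrangement sheets N M := by
  have hganti : ∀ r : Int, 0 ≤ r → r < N → ¬ (PySem.Int.floordiv r M < PySem.Int.floordiv N M) := by
    intro r hr0 hrN hlt
    have h1 := PySem.Int.floordiv_mul_add_mod r M
    have h2 := PySem.Int.floordiv_mul_add_mod N M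
    have h3 := PySem.Int.mod_neg_bounds (a := r) (b := M) hMneg
    have h4 := PySem.Int.mod_neg_bounds (a := N) (b := M) hMneg
    have h5 : PySem.Int.floordiv r M ≤ PySem.Int.floordiv N M - 1 := by omega
    have h6 : (PySem.Int.floordiv N M - 1) * M ≤ PySem.Int.floordiv r M * M :=
      mul_le_mul_of_nonpos_right h5 (by omega)
    have h7 : (PySem.Int.floordiv N M - 1) * M = PySem.Int.floordiv N M * M - M := by ring
    omega
  unfold makeGr makeGr_alt
  dsimp only
  simp only [PySem.List.pyRange_one_eq_nil (show M ≤ 0 by omega), List.foldl_nil]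
  rw [PySem.List.foldl_ignore]
  rw [PySem.List.foldl_append_singleton_eq_map, List.nil_append]
  refine List.map_congr_left (fun r hr => ?_)
  obtain ⟨hr0, hrN⟩ := PySem.List.mem_pyRange_one.mp hr
  have hNnn : N = ((N.toNat : Nat) : Int) := by omega
  rw [if_neg (hganti r hr0 hrN)]
  simp only [List.nil_append, List.length_nil, Nat.cast_zero, sub_zero,
    PySem.List.pyRepeat_singleton]
  rw [hNnn, pv_pyRange_map]
  apply List.ext_getElem <;> simp
  omega

theorem pv_B_empty (sheets : List (List (List String))) (N M : Int) (hM : 0 < M) :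
    makeGr [] sheets N M = makeGr_alt [] sheets N M := by
  unfold makeGr makeGr_alt
  dsimp only
  rw [PySem.List.enumerate_nil]
  simp only [List.foldl_nil, List.map_nil, List.length_nil, Nat.cast_zero]
  rw [PySem.List.foldl_append_singleton_eq_map, List.nil_append]
  refine List.map_congr_left (fun r hr => ?_)
  obtain ⟨hr0, hrN⟩ := PySem.List.mem_pyRange_one.mp hr
  have hbr0 : 0 ≤ PySem.Int.floordiv r M := by
    rw [PySem.Int.floordiv_eq_ediv_of_pos hM]
    exact Int.ediv_nonneg hr0 hM.le
  have hNnn : N = ((N.toNat : Nat) : Int) := by omega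
  by_cases h : PySem.Int.floordiv r M < PySem.Int.floordiv N M
  · rw [if_pos h, PySem.List.foldl_ite_eq_foldl_filter]
    have hprod : 0 ≤ PySem.Int.floordiv r M * PySem.Int.floordiv N M :=
      mul_nonneg hbr0 (le_trans hbr0 h.le)
    have hfilt : (PySem.List.pyRange 0 (PySem.Int.floordiv N M) 1).filter
        (fun bc => decide (PySem.Int.floordiv r M * PySem.Int.floordiv N M + bc < (0 : Int))) = [] := by
      refine List.filter_eq_nil_iff.mpr (fun bc hbc => ?_)
      obtain ⟨hbc0, _⟩ := PySem.List.mem_pyRange_one.mp hbc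
      simp only [decide_eq_true_eq]
      omega
    rw [hfilt, List.foldl_nil]
    simp only [List.nil_append, List.length_nil, Nat.cast_zero, sub_zero,
      PySem.List.pyRepeat_singleton]
    rw [hNnn, pv_pyRange_map]
    apply List.ext_getElem <;> simp
    omega
  · rw [if_neg h]
    simp only [List.nil_append, List.length_nil, Nat.cast_zero, sub_zero,
      PySem.List.pyRepeat_singleton]
    rw [hNnn, pv_pyRange_map]
    apply List.ext_getElem <;> simp
    omega

-- ===== VERDICT (by name: the statement is the Claim_ definition above) =====
theorem makeGr_spec : Claim_equal_makeGr := by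
  intro arrangement sheets N M _hdom hpre
  unfold Spec_makeGr
  rcases hpre with ⟨hM, hcase⟩ | ⟨hMneg, _⟩
  swap
  · exact pv_M_neg arrangement sheets N M hMneg
  rcases hcase with hnil | ⟨hns1, hlen, hsheets⟩
  · subst hnil
    exact pv_B_empty sheets N M hM
  · have hMc : M = (M.toNat : Int) := by omega
    have hfm := PySem.Int.floordiv_mul_add_mod N M
    have hmod := PySem.Int.mod_nonneg N hM
    have hNge : PySem.Int.floordiv N M * M ≤ N := by omega
    have hfd0 : (0 : Int) ≤ PySem.Int.floordiv N M := by omega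
    have h11 : (1 : Int) * 1 ≤ PySem.Int.floordiv N M * M :=
      mul_le_mul hns1 (by omega) (by omega) hfd0
    have hN0 : (0 : Int) ≤ N := by omega
    have hNc : N = (N.toNat : Int) := by omega
    set n := N.toNat with hndef
    set m := M.toNat with hmdef
    have hm : 0 < m := by omega
    have hfd : PySem.Int.floordiv N M = ((n / m : Nat) : Int) := by
      rw [hNc, hMc]; exact PySem.Int.floordiv_natCast n m
    have hns : 0 < n / m := by
      rw [hfd] at hns1; exact_mod_cast hns1
    have hnm : (n / m) * m ≤ n := by
      rw [hfd, hMc, hNc] at hNge; exact_mod_cast hNge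
    have hL' : arrangement.length ≤ (n / m) * (n / m) := by
      rw [hfd] at hlen; exact_mod_cast hlen
    have hsheet' : ∀ s ∈ arrangement, (m : Int) ≤ ((PySem.List.pyGetD sheets s []).length : Int) ∧
        ∀ row ∈ (PySem.List.pyGetD sheets s []).take m, (m : Int) ≤ ((row.length : Nat) : Int) := by
      intro s hs
      refine ⟨hMc ▸ (hsheets s hs).2.1, fun row hrow => hMc ▸ (hsheets s hs).2.2 row hrow⟩
    unfold makeGr makeGr_alt
    rw [hNc, hMc]
    simp only [PySem.Int.floordiv_natCast]
    rw [show (PySem.List.pyRange 0 (n : Int) 1).map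
          (fun _ => (PySem.List.pyRange 0 (n : Int) 1).map (fun _ => ("" : String)))
        = pvGrid n (fun _ _ => "") from by
      simp only [pv_pyRange_map]; rfl]
    rw [pv_A_fold sheets n m (n / m) hm hns hnm arrangement hL']
    exact (pv_B_fold arrangement sheets n m (n / m) hm hns hnm hL' hsheet').symm
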